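-- pv_equiv track=rewrite | github.com/rickardlindberg/rliterate2 | rliterate2.py | _find_word_break_point
-- ===== SOURCE A (Python) =====
-- def _find_word_break_point(line, next_character):
--     index = len(line) - 1
--     while index >= 0:
--         current_character = line[index][0]["text"]
--         if current_character == " " and next_character != " ":
--             return index
--         next_character = current_character
--         index -= 1
-- ===== SOURCE B (Python) =====
-- def _find_word_break_point(line, next_character):
--     chars = [seg[0]["text"] for seg in line]
--     result = None
--     for i in range(len(chars)):
--         right = chars[i + 1] if i + 1 < len(chars) else next_character
--         if chars[i] == " " and right != " ":
--             result = i
--     return result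
-- ===== Notes on version B (the rewrite author's own statement) =====
-- stated objective: alternative
-- what changed: B first materializes the segment texts into a flat list, then finds the rightmost qualifying space in a single forward pass with an overwritten accumulator, instead of A's backward scan with early return that threads next_character as loop state.
-- outside the precondition, e.g. on _find_word_break_point([[], [{'text': ' '}]], 'x'): A returns 1, B raises IndexError
import Mathlib
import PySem

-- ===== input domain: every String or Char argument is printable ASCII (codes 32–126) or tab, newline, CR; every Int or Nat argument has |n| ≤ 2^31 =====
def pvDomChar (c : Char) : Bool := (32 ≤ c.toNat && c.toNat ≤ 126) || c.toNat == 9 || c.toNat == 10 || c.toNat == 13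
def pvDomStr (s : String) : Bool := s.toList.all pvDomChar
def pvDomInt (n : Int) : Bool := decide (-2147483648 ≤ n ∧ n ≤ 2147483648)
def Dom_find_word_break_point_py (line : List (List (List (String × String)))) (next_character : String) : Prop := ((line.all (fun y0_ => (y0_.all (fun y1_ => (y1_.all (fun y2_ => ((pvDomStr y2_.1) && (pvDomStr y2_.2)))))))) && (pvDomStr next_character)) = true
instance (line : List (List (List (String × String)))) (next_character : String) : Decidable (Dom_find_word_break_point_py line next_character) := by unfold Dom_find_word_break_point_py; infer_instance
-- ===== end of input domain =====

-- B replaces A's backward early-return scan (threading next_character as state) by materializing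
-- the segment texts and doing one forward pass keeping the last qualifying index (objective: alternative).

-- ===== PORT A =====
-- seg[0]["text"]: first element of the segment, then first-match lookup of key "text"
-- (List.lookup is exact for Python dict read: first matching key; none = KeyError/IndexError).
def pvSegText (seg : List (List (String × String))) : Option String :=
  seg.head?.bind (fun d => d.lookup "text")

-- the while loop, index counting down; `n` is index+1, so `n = 0` means the loop ended (return None).
def pvAAux (line : List (List (List (String × String)))) (next_character : String) : Nat → Option Int
  | 0 => none
  | n + 1 =>
    match pvSegText (line.getD n []) with
    | none => none  -- Python raises here; excluded by Pre_
    | some current_character =>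
      if current_character = " " ∧ next_character ≠ " " then some (n : Int)
      else pvAAux line current_character n

def find_word_break_point_py (line : List (List (List (String × String)))) (next_character : String) : Option Int :=
  pvAAux line next_character line.length

-- ===== PORT B =====
-- the loop body: right = chars[i+1] if i+1 < len(chars) else next_character (= List.getD chars (i+1) next_character)
def pvBStep (chars : List String) (next_character : String) (result : Option Int) (i : Nat) : Option Int :=
  let right := chars.getD (i + 1) next_character
  if chars.getD i "" = " " ∧ right ≠ " " then some (i : Int) else result

def find_word_break_point_py_alt (line : List (List (List (String × String)))) (next_character : String) : Option Int :=
  let chars := line.map (fun seg => (pvSegText seg).getD "")  -- getD "" never fires under Pre_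
  (List.range chars.length).foldl (pvBStep chars next_character) none

-- ===== PRECONDITION & SPEC =====
-- Pre_ excludes lines with a malformed segment (empty, or first dict lacking key "text"): any full
-- scan raises there, yet A's backward early return can still return before reaching the bad segment
-- (B itself raises on such inputs).
def Pre_find_word_break_point_py (line : List (List (List (String × String)))) (next_character : String) : Prop :=
  ∀ seg ∈ line, (pvSegText seg).isSome
instance (line : List (List (List (String × String)))) (next_character : String) : Decidable (Pre_find_word_break_point_py line next_character) := by unfold Pre_find_word_break_point_py; infer_instance

def pvWitness_find_word_break_point_py : (List (List (List (String × String)))) × String :=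
  ([[[("text", " ")]], [[("text", "a")]]], "b")

def Spec_find_word_break_point_py (line : List (List (List (String × String)))) (next_character : String) (out : Option Int) : Prop := out = find_word_break_point_py_alt line next_character
instance (line : List (List (List (String × String)))) (next_character : String) (out : Option Int) : Decidable (Spec_find_word_break_point_py line next_character out) := by unfold Spec_find_word_break_point_py; infer_instance

-- ===== CLAIM (what is proved, stated in full; the proofs are below) =====
def Claim_equal_find_word_break_point_py : Prop := ∀ (line : List (List (List (String × String)))) (next_character : String), Dom_find_word_break_point_py line next_character → Pre_find_word_break_point_py line next_character → Spec_find_word_break_point_py line next_character (find_word_break_point_py line next_character)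

-- ===== LEMMAS AND PROOFS =====

-- A's loop on the materialized character list
def pvAStr (chars : List String) (next_character : String) : Nat → Option Int
  | 0 => none
  | n + 1 =>
    if chars.getD n "" = " " ∧ next_character ≠ " " then some (n : Int)
    else pvAStr chars (chars.getD n "") n

theorem pvAAux_eq_pvAStr (line : List (List (List (String × String)))) (next : String) (n : Nat)
    (hn : n ≤ line.length) (hpre : Pre_find_word_break_point_py line next) :
    pvAAux line next n = pvAStr (line.map (fun seg => (pvSegText seg).getD "")) next n := by
  induction n generalizing next with
  | zero => rfl
  | succ m ih =>
    have hm : m < line.length := hn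
    have hmem : line.getD m [] ∈ line := by
      rw [List.getD_eq_getElem _ _ hm]; exact List.getElem_mem hm
    have hsome := hpre _ hmem
    obtain ⟨c, hc⟩ := Option.isSome_iff_exists.mp hsome
    have hchars : (line.map (fun seg => (pvSegText seg).getD "")).getD m "" = c := by
      rw [List.getD_eq_getElem _ _ (by simpa using hm), List.getElem_map]
      rw [List.getD_eq_getElem _ _ hm] at hc
      simp [hc]
    simp only [pvAAux, pvAStr, hc, hchars]
    split
    · rfl
    · exact ih c (Nat.le_of_lt hm) hpre

-- the right neighbor seen by A at index n (when counting down from n+1)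
def pvRightOf (chars : List String) (next_character : String) (n : Nat) : String :=
  if n < chars.length then chars.getD n "" else next_character

theorem pvRightOf_getD (chars : List String) (next : String) (n : Nat) (h : n + 1 ≤ chars.length) :
    chars.getD (n + 1) next = pvRightOf chars next (n + 1) := by
  unfold pvRightOf
  rcases Nat.lt_or_ge (n + 1) chars.length with h1 | h1
  · rw [if_pos h1, List.getD_eq_getElem _ _ h1, List.getD_eq_getElem _ _ h1]
  · have : n + 1 = chars.length := Nat.le_antisymm h h1
    rw [if_neg (by omega), List.getD_eq_default]
    omega

theorem pvAStr_eq_foldl (chars : List String) (next : String) (n : Nat) (hn : n ≤ chars.length) :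
    pvAStr chars (pvRightOf chars next n) n
      = (List.range n).foldl (pvBStep chars next) none := by
  induction n with
  | zero => rfl
  | succ m ih =>
    rw [List.range_succ, List.foldl_append]
    have hm : m < chars.length := hn
    simp only [pvAStr, List.foldl_cons, List.foldl_nil, pvBStep]
    rw [pvRightOf_getD chars next m hn]
    split
    · rfl
    · have : pvRightOf chars next m = chars.getD m "" := by
        unfold pvRightOf; rw [if_pos hm]
      rw [← this, ih (Nat.le_of_lt hm)]

-- ===== VERDICT (by name: the statement is the Claim_ definition above) =====
theorem find_word_break_point_py_spec : Claim_equal_find_word_break_point_py := by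
  intro line next _hdom hpre
  show find_word_break_point_py line next = find_word_break_point_py_alt line next
  unfold find_word_break_point_py find_word_break_point_py_alt
  set chars := line.map (fun seg => (pvSegText seg).getD "") with hchars
  have hlen : chars.length = line.length := by simp [hchars]
  rw [pvAAux_eq_pvAStr line next line.length le_rfl hpre]
  have hright : pvRightOf chars next chars.length = next := by
    unfold pvRightOf; rw [if_neg (by omega)]
  have h := pvAStr_eq_foldl chars next chars.length le_rfl
  rw [hright, hlen] at h
  simpa [← hchars, hlen] using h
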